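-- pv_equiv track=rewrite | github.com/amirouche/bb.py | bonafide.py | _nstore_indices_verify_coverage
-- ===== SOURCE A (Python) =====
-- import itertools
-- from typing import Any, Callable, List, Optional, TypeVar, Dict, Tuple
--
-- def _nstore_indices_verify_coverage(indices: List[List[int]], n: int) -> bool:
--     """Verify that indices cover all possible query patterns."""
--     tab = list(range(n))
--     for r in range(1, n + 1):
--         for combination in itertools.combinations(tab, r):
--             covered = False
--             for index in indices:
--                 for perm in itertools.permutations(combination):
--                     if len(perm) <= len(index):
--                         if all(a == b for a, b in zip(perm, index)):
--                             covered = True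
--                             break
--                 if covered:
--                     break
--             if not covered:
--                 return False
--     return True
-- ===== SOURCE B (Python) =====
-- import itertools
--
-- def _nstore_indices_verify_coverage(indices, n):
--     # Precompute the set of (canonically sorted) duplicate-free prefixes of every index,
--     # then membership-test each combination: no permutations loop, no per-combination index scan.
--     prefixes = set()
--     for index in indices:
--         seen = []
--         for x in index:
--             if x in seen:
--                 break
--             seen.append(x)
--             prefixes.add(tuple(sorted(seen)))
--     return all(c in prefixes
--                for r in range(1, n + 1)
--                for c in itertools.combinations(range(n), r))
-- ===== Notes on version B (the rewrite author's own statement) =====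
-- stated objective: alternative
-- what changed: B precomputes once the set of canonically-sorted duplicate-free prefixes of every index and membership-tests each combination, replacing A's per-combination scan over all indices and all r! permutations.
import Mathlib
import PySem

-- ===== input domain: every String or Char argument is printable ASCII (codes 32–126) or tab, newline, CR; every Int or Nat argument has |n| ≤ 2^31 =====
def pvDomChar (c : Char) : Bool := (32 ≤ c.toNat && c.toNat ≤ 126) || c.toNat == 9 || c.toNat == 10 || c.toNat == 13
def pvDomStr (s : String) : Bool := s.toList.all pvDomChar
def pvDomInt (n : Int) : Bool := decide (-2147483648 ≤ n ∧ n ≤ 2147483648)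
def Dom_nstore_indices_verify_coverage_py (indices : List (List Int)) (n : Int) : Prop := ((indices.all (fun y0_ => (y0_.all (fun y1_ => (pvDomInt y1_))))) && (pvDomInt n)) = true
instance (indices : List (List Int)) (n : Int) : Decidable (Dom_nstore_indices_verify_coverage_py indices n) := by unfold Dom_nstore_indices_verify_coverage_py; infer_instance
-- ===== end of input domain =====

-- B precomputes the set of canonically sorted duplicate-free prefixes of every index once and
-- membership-tests each combination instead of A's per-combination permutations scan (objective: alternative).

-- ===== PORT A =====
-- 'for combination in itertools.combinations(tab, r): if not covered: return False' — the generator is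
-- LAZY and A returns at the first uncovered combination, so the loop is ported as a short-circuiting
-- recursion over CPython's combination order (proved below to agree with PySem.List.combinations).
def pvForCombsA (p : List Int → Bool) : List Int → Nat → Bool
  | _, 0 => p []
  | [], _ + 1 => true
  | x :: xs, r + 1 => pvForCombsA (fun c => p (x :: c)) xs r && pvForCombsA p xs (r + 1)

def nstore_indices_verify_coverage_py (indices : List (List Int)) (n : Int) : Bool :=
  (PySem.List.pyRange 1 (n + 1) 1).all (fun r =>
    pvForCombsA (fun combination =>
      indices.any (fun index =>
        (PySem.List.permutations combination combination.length).any (fun perm =>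
          decide (perm.length ≤ index.length) &&
          (perm.zip index).all (fun ab => ab.1 == ab.2)))) (PySem.List.pyRange 0 n 1) r.toNat)

-- ===== PORT B =====
-- inner loop of B: walk one index, stop at the first repeated element,
-- adding the canonically sorted form of each duplicate-free prefix to the set
def pvCollect (pre : PySem.Set (List Int)) (seen : List Int) : List Int → PySem.Set (List Int)
  | [] => pre
  | x :: rest =>
    if x ∈ seen then pre
    else pvCollect (PySem.Set.add pre (PySem.List.sorted (seen ++ [x]) (fun v => v) false)) (seen ++ [x]) rest

def pvPrefixes (indices : List (List Int)) : PySem.Set (List Int) :=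
  indices.foldl (fun pre index => pvCollect pre [] index) PySem.Set.empty

-- B's 'all(c in prefixes for r in … for c in itertools.combinations(range(n), r))' — the same lazy
-- short-circuiting enumeration of CPython's combination order as in the Python generator expression.
def pvForCombsB (p : List Int → Bool) : List Int → Nat → Bool
  | _, 0 => p []
  | [], _ + 1 => true
  | x :: xs, r + 1 => pvForCombsB (fun c => p (x :: c)) xs r && pvForCombsB p xs (r + 1)

def nstore_indices_verify_coverage_py_alt (indices : List (List Int)) (n : Int) : Bool :=
  (PySem.List.pyRange 1 (n + 1) 1).all (fun r =>
    pvForCombsB (fun c => PySem.Set.contains (pvPrefixes indices) c) (PySem.List.pyRange 0 n 1) r.toNat)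

-- ===== PRECONDITION & SPEC =====
def Spec_nstore_indices_verify_coverage_py (indices : List (List Int)) (n : Int) (out : Bool) : Prop := out = nstore_indices_verify_coverage_py_alt indices n
instance (indices : List (List Int)) (n : Int) (out : Bool) : Decidable (Spec_nstore_indices_verify_coverage_py indices n out) := by unfold Spec_nstore_indices_verify_coverage_py; infer_instance

-- ===== CLAIM (what is proved, stated in full; the proofs are below) =====
def Claim_equal_nstore_indices_verify_coverage_py : Prop := ∀ (indices : List (List Int)) (n : Int), Dom_nstore_indices_verify_coverage_py indices n → Spec_nstore_indices_verify_coverage_py indices n (nstore_indices_verify_coverage_py indices n)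

-- ===== LEMMAS AND PROOFS =====

-- the fused combination loops are the '.all' over itertools.combinations they transliterate
theorem pvForCombsA_eq : ∀ (xs : List Int) (r : Nat) (p : List Int → Bool),
    pvForCombsA p xs r = (PySem.List.combinations xs r).all p := by
  intro xs
  induction xs with
  | nil =>
    intro r p
    cases r with
    | zero => simp [pvForCombsA, PySem.List.combinations_zero]
    | succ r => simp [pvForCombsA, PySem.List.combinations_nil_succ]
  | cons x xs ih =>
    intro r p
    cases r with
    | zero => simp [pvForCombsA, PySem.List.combinations_zero]
    | succ r =>
      simp only [pvForCombsA, PySem.List.combinations_cons_succ, List.all_append, List.all_map, ih]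
      rfl

theorem pvForCombsB_eq : ∀ (xs : List Int) (r : Nat) (p : List Int → Bool),
    pvForCombsB p xs r = (PySem.List.combinations xs r).all p := by
  intro xs
  induction xs with
  | nil =>
    intro r p
    cases r with
    | zero => simp [pvForCombsB, PySem.List.combinations_zero]
    | succ r => simp [pvForCombsB, PySem.List.combinations_nil_succ]
  | cons x xs ih =>
    intro r p
    cases r with
    | zero => simp [pvForCombsB, PySem.List.combinations_zero]
    | succ r =>
      simp only [pvForCombsB, PySem.List.combinations_cons_succ, List.all_append, List.all_map, ih]
      rfl

-- zip-prefix test: the element-wise comparison of p against q succeeds iff p is the length-|p| prefix of q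
theorem pv_zip_all_iff : ∀ (p q : List Int), p.length ≤ q.length →
    (((p.zip q).all (fun ab => ab.1 == ab.2)) = true ↔ p = q.take p.length) := by
  intro p
  induction p with
  | nil => intro q _; simp
  | cons a p ih =>
    intro q hq
    cases q with
    | nil => simp at hq
    | cons b q =>
      simp only [List.zip_cons_cons, List.all_cons, List.length_cons, List.take_succ_cons,
        Bool.and_eq_true, beq_iff_eq, List.cons.injEq]
      constructor
      · rintro ⟨h1, h2⟩
        exact ⟨h1, (ih q (by simpa using hq)).mp h2⟩
      · rintro ⟨h1, h2⟩
        exact ⟨h1, (ih q (by simpa using hq)).mpr h2⟩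

-- converse of perm_of_mem_permutations: every rearrangement of xs occurs in permutations(xs)
theorem pv_mem_permutations_of_perm (p : List Int) : ∀ (xs : List Int), p.Perm xs →
    p ∈ PySem.List.permutations xs xs.length := by
  induction p with
  | nil =>
    intro xs hp
    have hx : xs = [] := hp.symm.eq_nil
    subst hx
    simp [PySem.List.permutations_zero]
  | cons h t ih =>
    intro xs hp
    have hmem : h ∈ xs := hp.subset List.mem_cons_self
    have hlen : xs.length = t.length + 1 := by
      have := hp.length_eq; simpa using this.symm
    rw [hlen, PySem.List.permutations_succ]
    simp only [List.mem_flatMap, List.mem_range]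
    have hidx : xs.idxOf h < xs.length := List.idxOf_lt_length_of_mem hmem
    refine ⟨xs.idxOf h, hidx, ?_⟩
    rw [List.getElem?_idxOf hmem]
    simp only [List.mem_map]
    have hperm : t.Perm (xs.erase h) := by
      have h1 : xs.Perm (h :: xs.erase h) := List.perm_cons_erase hmem
      exact (hp.trans h1).cons_inv
    have herase : xs.eraseIdx (xs.idxOf h) = xs.erase h := List.eraseIdx_idxOf_eq_erase h xs
    have hlen2 : (xs.erase h).length = t.length := by
      rw [List.length_erase_of_mem hmem, hlen]; rfl
    refine ⟨t, ?_, rfl⟩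
    rw [herase, ← hlen2]
    exact ih (xs.erase h) hperm

-- A's inner two loops, characterised: some index has the combination as a permuted prefix
theorem pv_coveredA_iff (indices : List (List Int)) (c : List Int) :
    ((indices.any (fun index =>
        (PySem.List.permutations c c.length).any (fun perm =>
          decide (perm.length ≤ index.length) &&
          (perm.zip index).all (fun ab => ab.1 == ab.2)))) = true)
    ↔ ∃ index ∈ indices, c.length ≤ index.length ∧ (index.take c.length).Perm c := by
  simp only [List.any_eq_true, Bool.and_eq_true, decide_eq_true_eq]
  constructor
  · rintro ⟨index, hi, perm, hpm, hle, hz⟩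
    have hperm : perm.Perm c := PySem.List.perm_of_mem_permutations hpm
    have hl : perm.length = c.length := hperm.length_eq
    have hpre := (pv_zip_all_iff perm index hle).mp hz
    refine ⟨index, hi, by omega, ?_⟩
    rw [← hl, ← hpre]
    exact hperm
  · rintro ⟨index, hi, hle, hperm⟩
    have hl : (index.take c.length).length = c.length := by
      simp [List.length_take]; omega
    refine ⟨index, hi, index.take c.length, pv_mem_permutations_of_perm _ c hperm, by omega, ?_⟩
    rw [pv_zip_all_iff _ index (by omega), hl]

-- membership in the inner-loop accumulator of B
theorem pv_mem_collect (c : List Int) : ∀ (rest : List Int) (pre : PySem.Set (List Int)) (seen : List Int),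
    seen.Nodup →
    (c ∈ pvCollect pre seen rest ↔ c ∈ pre ∨ ∃ k, 0 < k ∧ k ≤ rest.length ∧
      (seen ++ rest.take k).Nodup ∧ c = PySem.List.sorted (seen ++ rest.take k) (fun v => v) false) := by
  intro rest
  induction rest with
  | nil =>
    intro pre seen _
    simp only [pvCollect, List.length_nil]
    constructor
    · exact Or.inl
    · rintro (h | ⟨k, hk0, hk, _⟩)
      · exact h
      · omega
  | cons x rest ih =>
    intro pre seen hs
    by_cases hx : x ∈ seen
    · rw [pvCollect, if_pos hx]
      constructor
      · exact Or.inl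
      · rintro (h | ⟨k, hk0, hk, hnd, _⟩)
        · exact h
        · exfalso
          cases k with
          | zero => omega
          | succ k' =>
            rw [List.take_succ_cons] at hnd
            exact (List.disjoint_of_nodup_append hnd) hx List.mem_cons_self
    · have hs' : (seen ++ [x]).Nodup := by
        simp [List.nodup_append, hs]
        exact fun a ha he => hx (he ▸ ha)
      have hsplit : ∀ k : Nat, seen ++ (x :: rest).take (k + 1) = (seen ++ [x]) ++ rest.take k := by
        intro k
        rw [List.take_succ_cons]
        simp
      rw [pvCollect, if_neg hx, ih _ (seen ++ [x]) hs', PySem.Set.mem_add]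
      constructor
      · rintro ((h | h) | ⟨k, hk0, hk, hnd, hc⟩)
        · exact Or.inl h
        · refine Or.inr ⟨1, one_pos, by simp, ?_, ?_⟩
          · rw [hsplit 0]; simpa using hs'
          · rw [hsplit 0]; simpa using h
        · refine Or.inr ⟨k + 1, by omega, by simp; omega, ?_, ?_⟩
          · rw [hsplit k]; exact hnd
          · rw [hsplit k]; exact hc
      · rintro (h | ⟨k, hk0, hk, hnd, hc⟩)
        · exact Or.inl (Or.inl h)
        · cases k with
          | zero => omega
          | succ k' =>
            rw [hsplit k'] at hnd hc
            cases Nat.eq_zero_or_pos k' with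
            | inl h0 =>
              subst h0
              simp only [List.take_zero, List.append_nil] at hc
              exact Or.inl (Or.inr hc)
            | inr hpos =>
              refine Or.inr ⟨k', hpos, by simp at hk; omega, hnd, hc⟩

-- membership in B's precomputed prefix set
theorem pv_mem_prefixes (indices : List (List Int)) (c : List Int) :
    c ∈ pvPrefixes indices ↔ ∃ index ∈ indices, ∃ k, 0 < k ∧ k ≤ index.length ∧
      (index.take k).Nodup ∧ c = PySem.List.sorted (index.take k) (fun v => v) false := by
  have main : ∀ (l : List (List Int)) (pre : PySem.Set (List Int)),
      c ∈ l.foldl (fun pre index => pvCollect pre [] index) pre ↔ c ∈ pre ∨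
        ∃ index ∈ l, ∃ k, 0 < k ∧ k ≤ index.length ∧
          (index.take k).Nodup ∧ c = PySem.List.sorted (index.take k) (fun v => v) false := by
    intro l
    induction l with
    | nil => intro pre; simp
    | cons i l ihl =>
      intro pre
      rw [List.foldl_cons, ihl, pv_mem_collect c i pre [] List.nodup_nil]
      simp only [List.nil_append, List.mem_cons]
      constructor
      · rintro ((h | ⟨k, hk⟩) | ⟨index, hi, hrest⟩)
        · exact Or.inl h
        · exact Or.inr ⟨i, Or.inl rfl, k, hk⟩
        · exact Or.inr ⟨index, Or.inr hi, hrest⟩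
      · rintro (h | ⟨index, (rfl | hi), hrest⟩)
        · exact Or.inl (Or.inl h)
        · exact Or.inl (Or.inr hrest)
        · exact Or.inr ⟨index, hi, hrest⟩
  rw [pvPrefixes, main]
  simp [PySem.Set.empty]

-- pointwise bridge: for a strictly increasing nonempty combination c,
-- A's covering test over indices agrees with membership in B's prefix set
theorem pv_pointwise (indices : List (List Int)) (c : List Int)
    (hlt : c.Pairwise (· < ·)) (h0 : 0 < c.length) :
    (indices.any (fun index =>
        (PySem.List.permutations c c.length).any (fun perm =>
          decide (perm.length ≤ index.length) &&
          (perm.zip index).all (fun ab => ab.1 == ab.2))))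
    = PySem.Set.contains (pvPrefixes indices) c := by
  have hnd : c.Nodup := hlt.imp ne_of_lt
  have hsc : PySem.List.sorted c (fun v => v) false = c :=
    PySem.List.sorted_eq_self_of_pairwise c (fun v => v) (hlt.imp le_of_lt)
  rw [Bool.eq_iff_iff, PySem.Set.contains_iff, pv_coveredA_iff, pv_mem_prefixes]
  constructor
  · rintro ⟨index, hi, hle, hperm⟩
    refine ⟨index, hi, c.length, h0, hle, hperm.nodup_iff.mpr hnd, ?_⟩
    rw [← PySem.List.sorted_id_eq_sorted_id_iff_perm] at hperm
    rw [← hperm] at hsc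
    exact hsc.symm
  · rintro ⟨index, hi, k, hk0, hk, hnd', hc⟩
    have hperm : (index.take k).Perm c := by
      rw [← PySem.List.sorted_id_eq_sorted_id_iff_perm, hsc]
      exact hc.symm
    have hkl : k = c.length := by
      have := hperm.length_eq
      simp only [List.length_take] at this
      omega
    subst hkl
    exact ⟨index, hi, by omega, hperm⟩

-- ===== VERDICT (by name: the statement is the Claim_ definition above) =====
theorem nstore_indices_verify_coverage_py_spec : Claim_equal_nstore_indices_verify_coverage_py := by
  intro indices n _
  unfold Spec_nstore_indices_verify_coverage_py
  unfold nstore_indices_verify_coverage_py nstore_indices_verify_coverage_py_alt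
  simp only [pvForCombsA_eq, pvForCombsB_eq]
  rw [Bool.eq_iff_iff]
  simp only [List.all_eq_true]
  refine forall_congr' fun r => imp_congr_right fun hr => forall_congr' fun c => imp_congr_right fun hc => ?_
  have hr1 : (1 : Int) ≤ r := (PySem.List.mem_pyRange_one.mp hr).1
  obtain ⟨hsub, hlen⟩ := (PySem.List.mem_combinations_iff _ _ _).mp hc
  have hlt : c.Pairwise (· < ·) := (PySem.List.pairwise_lt_pyRange_one 0 n).sublist hsub
  have h0 : 0 < c.length := by rw [hlen]; omega
  rw [pv_pointwise indices c hlt h0]
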